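-- pv_equiv track=rewrite | github.com/lordpython/multi-agent-video-system | src/video_system/tools/story_tools.py | _split_content_into_segments
-- ===== SOURCE A (Python) =====
-- from typing import Dict, Any, List
--
-- def _split_content_into_segments(content: str, segment_count: int) -> List[str]:
--     """Split content into logical segments."""
--     # Split by paragraphs first
--     paragraphs = [p.strip() for p in content.split('\n\n') if p.strip()]
--
--     if len(paragraphs) >= segment_count:
--         # Distribute paragraphs across segments
--         segments = []
--         paras_per_segment = len(paragraphs) // segment_count
--
--         for i in range(segment_count):
--             start_idx = i * paras_per_segment
--             end_idx = start_idx + paras_per_segment if i < segment_count - 1 else len(paragraphs)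
--             segment_paras = paragraphs[start_idx:end_idx]
--             segments.append('\n\n'.join(segment_paras))
--
--         return segments
--     else:
--         # Split by sentences if not enough paragraphs
--         sentences = [s.strip() + '.' for s in content.split('.') if s.strip()]
--         sentences_per_segment = max(1, len(sentences) // segment_count)
--
--         segments = []
--         for i in range(segment_count):
--             start_idx = i * sentences_per_segment
--             end_idx = start_idx + sentences_per_segment if i < segment_count - 1 else len(sentences)
--             segment_sentences = sentences[start_idx:end_idx]
--             segments.append(' '.join(segment_sentences))
--
--         return segments
-- ===== SOURCE B (Python) =====
-- from typing import List
--
-- def _split_content_into_segments(content: str, segment_count: int) -> List[str]: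
--     """Split content into logical segments: one forward pass distributing items into buckets."""
--     paragraphs = [p.strip() for p in content.split('\n\n') if p.strip()]
--     if len(paragraphs) >= segment_count:
--         items, sep = paragraphs, '\n\n'
--         per = len(items) // segment_count
--     else:
--         items = [s.strip() + '.' for s in content.split('.') if s.strip()]
--         sep = ' '
--         per = max(1, len(items) // segment_count)
--     buckets = [[] for _ in range(segment_count)]
--     for j, item in enumerate(items):
--         buckets[min(j // per, segment_count - 1)].append(item)
--     return [sep.join(b) for b in buckets]
-- ===== Notes on version B (the rewrite author's own statement) =====
-- stated objective: alternative
-- what changed: Replaces the loop over output slots with index-arithmetic slicing by a single forward pass over the items that drops each item into bucket min(j//per, segment_count-1), then joins the buckets.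
-- outside the precondition, e.g. on _split_content_into_segments('a\n\nb', -1): A returns [], B raises IndexError; on _split_content_into_segments('', -2): A returns [], B returns []
import Mathlib
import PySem

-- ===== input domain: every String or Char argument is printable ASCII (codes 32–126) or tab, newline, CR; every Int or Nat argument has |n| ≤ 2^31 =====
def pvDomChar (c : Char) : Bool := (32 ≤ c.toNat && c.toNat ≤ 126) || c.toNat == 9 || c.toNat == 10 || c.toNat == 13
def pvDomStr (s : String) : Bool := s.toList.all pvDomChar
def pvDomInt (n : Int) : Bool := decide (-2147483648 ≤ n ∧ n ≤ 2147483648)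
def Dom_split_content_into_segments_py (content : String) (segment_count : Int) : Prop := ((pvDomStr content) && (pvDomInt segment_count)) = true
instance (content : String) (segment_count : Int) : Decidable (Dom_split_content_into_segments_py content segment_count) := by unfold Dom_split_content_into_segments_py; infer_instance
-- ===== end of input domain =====

-- B replaces A's loop over output slots (each taking a slice by index arithmetic) with a single
-- forward pass distributing item j into bucket min(j // per, segment_count - 1); same cost, different shape.

-- ===== PORT A =====
def split_content_into_segments_py (content : String) (segment_count : Int) : List String :=
  -- paragraphs = [p.strip() for p in content.split('\n\n') if p.strip()]  (split? is some: sep ≠ "")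
  let paragraphs := (((PySem.Str.split? content "\n\n").getD []).map PySem.Str.strip).filter (fun p => p ≠ "")
  if (paragraphs.length : Int) ≥ segment_count then
    let paras_per_segment := PySem.Int.floordiv (paragraphs.length : Int) segment_count
    (PySem.List.pyRange 0 segment_count 1).foldl (fun segments i =>
      let start_idx := i * paras_per_segment
      let end_idx := if i < segment_count - 1 then start_idx + paras_per_segment else (paragraphs.length : Int)
      segments ++ [PySem.Str.join "\n\n" (PySem.List.slice paragraphs (some start_idx) (some end_idx))]) []
  else
    -- sentences = [s.strip() + '.' for s in content.split('.') if s.strip()]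
    let sentences := ((((PySem.Str.split? content ".").getD []).map PySem.Str.strip).filter (fun s => s ≠ "")).map (fun s => s ++ ".")
    let sentences_per_segment := max 1 (PySem.Int.floordiv (sentences.length : Int) segment_count)
    (PySem.List.pyRange 0 segment_count 1).foldl (fun segments i =>
      let start_idx := i * sentences_per_segment
      let end_idx := if i < segment_count - 1 then start_idx + sentences_per_segment else (sentences.length : Int)
      segments ++ [PySem.Str.join " " (PySem.List.slice sentences (some start_idx) (some end_idx))]) []

-- ===== PORT B =====
def split_content_into_segments_py_alt (content : String) (segment_count : Int) : List String :=
  let paragraphs := (((PySem.Str.split? content "\n\n").getD []).map PySem.Str.strip).filter (fun p => p ≠ "")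
  let isp :=
    if (paragraphs.length : Int) ≥ segment_count then
      (paragraphs, "\n\n", PySem.Int.floordiv (paragraphs.length : Int) segment_count)
    else
      let sentences := ((((PySem.Str.split? content ".").getD []).map PySem.Str.strip).filter (fun s => s ≠ "")).map (fun s => s ++ ".")
      (sentences, " ", max 1 (PySem.Int.floordiv (sentences.length : Int) segment_count))
  -- buckets = [[] for _ in range(segment_count)]; buckets[min(j // per, segment_count-1)].append(item)
  -- (Pre_ guarantees 1 ≤ segment_count, so the bucket index is in range: no negative-index wraparound here)
  let buckets := (PySem.List.enumerate isp.1 0).foldl (fun bs p =>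
      bs.set (min (PySem.Int.floordiv p.1 isp.2.2) (segment_count - 1)).toNat
        ((bs.getD (min (PySem.Int.floordiv p.1 isp.2.2) (segment_count - 1)).toNat []) ++ [p.2]))
    ((PySem.List.pyRange 0 segment_count 1).map (fun _ => ([] : List String)))
  buckets.map (fun b => PySem.Str.join isp.2.1 b)

-- ===== PRECONDITION & SPEC =====
-- Pre_ excludes nonpositive segment_count: at 0 both programs raise ZeroDivisionError, and for
-- negative counts A returns an accidental empty list while B's bucket loop raises IndexError as soon
-- as there is any item (with blank content both happen to return [], still excluded as accidental).
def Pre_split_content_into_segments_py (content : String) (segment_count : Int) : Prop := 1 ≤ segment_count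
instance (content : String) (segment_count : Int) : Decidable (Pre_split_content_into_segments_py content segment_count) := by unfold Pre_split_content_into_segments_py; infer_instance
def pvWitness_split_content_into_segments_py : String × Int := ("First para.\n\nSecond one. More.", 2)

def Spec_split_content_into_segments_py (content : String) (segment_count : Int) (out : List String) : Prop := out = split_content_into_segments_py_alt content segment_count
instance (content : String) (segment_count : Int) (out : List String) : Decidable (Spec_split_content_into_segments_py content segment_count out) := by unfold Spec_split_content_into_segments_py; infer_instance

-- ===== CLAIM (what is proved, stated in full; the proofs are below) =====
def Claim_equal_split_content_into_segments_py : Prop := ∀ (content : String) (segment_count : Int), Dom_split_content_into_segments_py content segment_count → Pre_split_content_into_segments_py content segment_count → Spec_split_content_into_segments_py content segment_count (split_content_into_segments_py content segment_count)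

-- ===== LEMMAS AND PROOFS =====

def pvSeg {α : Type} (items : List α) (sc q i : Nat) : List α :=
  if i + 1 < sc then (items.drop (i * q)).take q else items.drop (i * q)

def pvStep {α : Type} (sc q : Nat) (bs : List (List α)) (p : α × Nat) : List (List α) :=
  bs.set (min (p.2 / q) (sc - 1)) ((bs.getD (min (p.2 / q) (sc - 1)) []) ++ [p.1])

lemma pv_div_eq_iff (m q i : Nat) (hq : 0 < q) : m / q = i ↔ i * q ≤ m ∧ m < i * q + q := by
  rw [show i * q + q = (i + 1) * q by ring]
  constructor
  · intro h
    exact ⟨(Nat.le_div_iff_mul_le hq).1 (le_of_eq h.symm),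
           (Nat.div_lt_iff_lt_mul hq).1 (by omega)⟩
  · rintro ⟨h1, h2⟩
    have ha := (Nat.le_div_iff_mul_le hq).2 h1
    have hb := (Nat.div_lt_iff_lt_mul hq).2 h2
    omega

lemma pvSeg_append {α : Type} (ys : List α) (x : α) (sc q i : Nat) (hq : 0 < q) (hi : i < sc) :
    pvSeg (ys ++ [x]) sc q i =
      if i = min (ys.length / q) (sc - 1) then pvSeg ys sc q i ++ [x] else pvSeg ys sc q i := by
  unfold pvSeg
  have hlen : (ys.drop (i * q)).length = ys.length - i * q := List.length_drop
  split_ifs with h1 h2 h2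
  · -- middle segment, receives x : i*q ≤ m < i*q + q
    have hdiv : ys.length / q = i := by omega
    obtain ⟨hb1, hb2⟩ := (pv_div_eq_iff ys.length q i hq).1 hdiv
    rw [List.drop_append, List.take_append, hlen]
    rw [show i * q - ys.length = 0 by omega, List.drop_zero]
    rw [List.take_of_length_le (l := [x]) (by simp; omega)]
  · -- middle segment, does not receive x
    have hnd : ¬ (i * q ≤ ys.length ∧ ys.length < i * q + q) := by
      intro hc
      exact h2 (by have := (pv_div_eq_iff ys.length q i hq).2 hc; omega)
    rw [List.drop_append, List.take_append, hlen]
    rcases le_or_gt (i * q) ys.length with hle | hlt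
    · rw [show q - (ys.length - i * q) = 0 by omega, List.take_zero, List.append_nil]
    · rw [List.drop_of_length_le (l := [x]) (by simp; omega), List.take_nil, List.append_nil]
  · -- last segment, receives x : i = sc-1 and i*q ≤ m
    have hi' : i = sc - 1 := by omega
    subst hi'
    have hle : (sc - 1) * q ≤ ys.length :=
      (Nat.le_div_iff_mul_le (x := sc - 1) (y := ys.length) hq).1 (by omega)
    rw [List.drop_append, show (sc - 1) * q - ys.length = 0 by omega, List.drop_zero]
  · -- last segment, does not receive x : ys.length < i*q
    have hi' : i = sc - 1 := by omega
    subst hi'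
    have hlt : ys.length < (sc - 1) * q := by
      by_contra hc
      have := (Nat.le_div_iff_mul_le (x := sc - 1) (y := ys.length) hq).2 (by omega)
      exact h2 (by omega)
    rw [List.drop_append, List.drop_of_length_le (l := [x]) (by simp; omega), List.append_nil]

lemma pvSet_map_range {β : Type} (f : Nat → β) (sc j : Nat) (v : β) (_hj : j < sc) :
    ((List.range sc).map f).set j v = (List.range sc).map (fun i => if i = j then v else f i) := by
  apply List.ext_getElem
  · simp
  · intro k h1 h2
    simp only [List.getElem_set, List.getElem_map, List.getElem_range]
    rcases eq_or_ne j k with rfl | hk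
    · simp
    · rw [if_neg hk, if_neg (Ne.symm hk)]

lemma pvFold_eq {α : Type} (sc q : Nat) (hq : 0 < q) (hsc : 0 < sc) (items : List α) :
    (items.zipIdx).foldl (pvStep sc q) (List.replicate sc ([] : List α))
      = (List.range sc).map (pvSeg items sc q) := by
  induction items using List.reverseRecOn with
  | nil =>
      have h : (List.range sc).map (pvSeg ([] : List α) sc q) = (List.range sc).map (fun _ => ([] : List α)) :=
        List.map_congr_left (by intro i _; simp [pvSeg])
      simp [h, List.map_const']
  | append_singleton ys x ih =>
      rw [List.zipIdx_append, List.foldl_append]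
      have hz : ([x].zipIdx (0 + ys.length)) = [(x, ys.length)] := by simp
      rw [hz, List.foldl_cons, List.foldl_nil, ih]
      have hmin : min (ys.length / q) (sc - 1) < sc := by omega
      unfold pvStep
      rw [PySem.List.getD_map_range _ _ _ _ hmin, pvSet_map_range _ _ _ _ hmin]
      symm
      apply List.map_congr_left
      intro i hi
      rw [pvSeg_append ys x sc q i hq (List.mem_range.1 hi)]
      split_ifs with h
      · rw [h]
      · rfl

lemma pvBridge {α : Type} (items : List α) (sc q : Nat) (hsc : 0 < sc) (init : List (List α)) :
    (PySem.List.enumerate items 0).foldl (fun bs p =>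
        bs.set (min (PySem.Int.floordiv p.1 (q : Int)) ((sc : Int) - 1)).toNat
          ((bs.getD (min (PySem.Int.floordiv p.1 (q : Int)) ((sc : Int) - 1)).toNat []) ++ [p.2])) init
      = (items.zipIdx).foldl (pvStep sc q) init := by
  rw [PySem.List.enumerate_eq_zipIdx_map, List.foldl_map]
  apply PySem.List.foldl_congr_mem
  intro bs p _
  have hcast : (min (PySem.Int.floordiv ((0 : Int) + (p.2 : Int)) (q : Int)) ((sc : Int) - 1)).toNat
      = min (p.2 / q) (sc - 1) := by
    rw [zero_add, PySem.Int.floordiv_natCast]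
    have h : ((sc : Int) - 1) = ((sc - 1 : Nat) : Int) := by omega
    rw [h, ← Nat.cast_min, Int.toNat_natCast]
  simp only [hcast]
  rfl

lemma pvBranch (items : List String) (sep : String) (n q : Nat) (hn : 0 < n) (hq : 0 < q) :
    (PySem.List.pyRange 0 (n : Int) 1).foldl (fun segments i =>
        segments ++ [PySem.Str.join sep (PySem.List.slice items (some (i * (q : Int)))
          (some (if i < (n : Int) - 1 then i * (q : Int) + (q : Int) else (items.length : Int))))]) []
      = ((PySem.List.enumerate items 0).foldl (fun bs p =>
            bs.set (min (PySem.Int.floordiv p.1 (q : Int)) ((n : Int) - 1)).toNat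
              ((bs.getD (min (PySem.Int.floordiv p.1 (q : Int)) ((n : Int) - 1)).toNat []) ++ [p.2]))
          ((PySem.List.pyRange 0 (n : Int) 1).map (fun _ => ([] : List String)))).map
        (fun b => PySem.Str.join sep b) := by
  have hinit : (PySem.List.pyRange 0 (n : Int) 1).map (fun _ => ([] : List String))
      = List.replicate n ([] : List String) := by
    rw [PySem.List.pyRange_zero_natCast, List.map_map]
    simp [Function.comp_def, List.map_const']
  rw [hinit, pvBridge items n q hn, pvFold_eq n q hq hn]
  rw [PySem.List.foldl_append_singleton_eq_map, List.nil_append]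
  rw [PySem.List.pyRange_zero_natCast, List.map_map, List.map_map]
  apply List.map_congr_left
  intro k hk
  have hk' : k < n := List.mem_range.1 hk
  simp only [Function.comp]
  congr 1
  unfold pvSeg
  by_cases hcase : k + 1 < n
  · rw [if_pos (show ((k : Nat) : Int) < (n : Int) - 1 by exact_mod_cast (by omega : (k : Int) < (n : Int) - 1))]
    rw [show ((k : Nat) : Int) * (q : Int) = ((k * q : Nat) : Int) by push_cast; ring]
    rw [show ((k * q : Nat) : Int) + (q : Int) = ((k * q + q : Nat) : Int) by push_cast; ring]
    rw [PySem.List.slice_natCast, if_pos hcase]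
    congr 1
    omega
  · rw [if_neg (show ¬ ((k : Nat) : Int) < (n : Int) - 1 by omega)]
    rw [show ((k : Nat) : Int) * (q : Int) = ((k * q : Nat) : Int) by push_cast; ring]
    rw [PySem.List.slice_natCast, if_neg hcase]
    apply List.take_of_length_le
    rw [List.length_drop]

-- ===== VERDICT (by name: the statement is the Claim_ definition above) =====
theorem split_content_into_segments_py_spec : Claim_equal_split_content_into_segments_py := by
  intro content segment_count _ hpre
  unfold Pre_split_content_into_segments_py at hpre
  unfold Spec_split_content_into_segments_py
  unfold split_content_into_segments_py split_content_into_segments_py_alt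
  obtain ⟨n, rfl⟩ : ∃ n : Nat, segment_count = (n : Int) := ⟨segment_count.toNat, by omega⟩
  have hn : 0 < n := by exact_mod_cast hpre
  set P := (((PySem.Str.split? content "\n\n").getD []).map PySem.Str.strip).filter (fun p => p ≠ "") with hP
  by_cases hbr : (P.length : Int) ≥ (n : Int)
  · simp only [if_pos hbr]
    rw [PySem.Int.floordiv_natCast]
    have hq : 0 < P.length / n := Nat.one_le_div_iff hn |>.2 (by exact_mod_cast hbr)
    exact pvBranch P "\n\n" n (P.length / n) hn hq
  · simp only [if_neg hbr]
    set S := ((((PySem.Str.split? content ".").getD []).map PySem.Str.strip).filter (fun s => s ≠ "")).map (fun s => s ++ ".") with hS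
    rw [PySem.Int.floordiv_natCast]
    rw [show max (1 : Int) ((S.length / n : Nat) : Int) = ((max 1 (S.length / n) : Nat) : Int) by omega]
    exact pvBranch S " " n (max 1 (S.length / n)) hn (by omega)
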